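-- pv_equiv track=rewrite | github.com/linwangmeyer/scz_LLMs | bert_utils.py | count_repetition
-- ===== SOURCE A (Python) =====
-- from collections import Counter
--
-- def count_repetition(word_list, window_size):
--     ''' It is used to identify the repeated words within a small window of text
--         word_list: a list word to check for repetition
--         window_size: a number that defines how many words to check for repetition'''
--     word_with_repeated_counts = Counter()
--     for i in range(len(word_list)):
--         word = word_list[i]
--         start_index = max(0, i - window_size)
--         end_index = i
--         # Extract the preceding words within the window
--         window = word_list[start_index:end_index]
--         if word in window and len(window) > 1:
--             word_with_repeated_counts[word] += 1
--     return word_with_repeated_counts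
-- ===== SOURCE B (Python) =====
-- from collections import Counter
--
-- def count_repetition(word_list, window_size):
--     result = Counter()
--     if window_size < 2:
--         return result  # a preceding window of length > 1 is impossible
--     win = Counter()  # counts of the words in word_list[max(0, i-window_size):i]
--     for i, word in enumerate(word_list):
--         if i > 1 and win[word] > 0:
--             result[word] += 1
--         win[word] += 1
--         j = i - window_size
--         if j >= 0:
--             win[word_list[j]] -= 1
--     return result
-- ===== Notes on version B (the rewrite author's own statement) =====
-- stated objective: faster
-- what changed: Replaces the per-index window slice and linear membership scan with a single pass that maintains a sliding-window Counter, giving O(1) amortized work per word.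
import Mathlib
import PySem

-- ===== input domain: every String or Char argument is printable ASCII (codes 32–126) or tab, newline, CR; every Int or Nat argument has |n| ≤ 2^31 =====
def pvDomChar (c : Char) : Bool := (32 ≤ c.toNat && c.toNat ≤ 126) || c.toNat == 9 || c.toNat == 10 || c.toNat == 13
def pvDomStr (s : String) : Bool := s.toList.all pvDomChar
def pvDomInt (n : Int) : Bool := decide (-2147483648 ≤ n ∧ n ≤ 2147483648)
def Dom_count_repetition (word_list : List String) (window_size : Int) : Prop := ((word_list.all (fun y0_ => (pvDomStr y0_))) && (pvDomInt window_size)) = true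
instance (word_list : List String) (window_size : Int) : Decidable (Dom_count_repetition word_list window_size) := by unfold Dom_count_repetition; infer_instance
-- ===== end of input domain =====

-- B replaces A's per-index window slice + linear membership scan by a single pass
-- maintaining a sliding-window Counter (objective: faster).

-- ===== PORT A =====
-- loop body of A: slice out the preceding window, test membership, bump the Counter
def stepA (word_list : List String) (window_size : Int)
    (d : PySem.Dict String Int) (i : Int) : PySem.Dict String Int :=
  let word := PySem.List.pyGetD word_list i ""
  let start_index := max 0 (i - window_size)
  let window := PySem.List.slice word_list (some start_index) (some i)
  if word ∈ window ∧ 1 < window.length then d.modify word 0 (· + 1) else d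

def count_repetition (word_list : List String) (window_size : Int) : List (String × Int) :=
  ((PySem.List.pyRange 0 (word_list.length : Int) 1).foldl (stepA word_list window_size)
    (PySem.Dict.empty : PySem.Dict String Int)).items

-- ===== PORT B =====
-- loop body of B: check the sliding-window counter, then slide the window by one
def stepB (word_list : List String) (window_size : Int)
    (st : PySem.Dict String Int × PySem.Dict String Int) (p : Int × String) :
    PySem.Dict String Int × PySem.Dict String Int :=
  let i := p.1
  let word := p.2
  let result := if 1 < i ∧ 0 < st.2.getD word 0 then st.1.modify word 0 (· + 1) else st.1
  let win := st.2.modify word 0 (· + 1)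
  let j := i - window_size
  let win := if 0 ≤ j then win.modify (PySem.List.pyGetD word_list j "") 0 (· - 1) else win
  (result, win)

def count_repetition_alt (word_list : List String) (window_size : Int) : List (String × Int) :=
  if window_size < 2 then (PySem.Dict.empty : PySem.Dict String Int).items
  else
    (((PySem.List.enumerate word_list 0).foldl (stepB word_list window_size)
        ((PySem.Dict.empty : PySem.Dict String Int),
         (PySem.Dict.empty : PySem.Dict String Int)))).1.items

-- ===== PRECONDITION & SPEC =====
def Spec_count_repetition (word_list : List String) (window_size : Int) (out : List (String × Int)) : Prop := out = count_repetition_alt word_list window_size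
instance (word_list : List String) (window_size : Int) (out : List (String × Int)) : Decidable (Spec_count_repetition word_list window_size out) := by unfold Spec_count_repetition; infer_instance

-- ===== CLAIM (what is proved, stated in full; the proofs are below) =====
def Claim_equal_count_repetition : Prop := ∀ (word_list : List String) (window_size : Int), Dom_count_repetition word_list window_size → Spec_count_repetition word_list window_size (count_repetition word_list window_size)

-- ===== LEMMAS AND PROOFS =====

set_option maxHeartbeats 1000000

-- the contents of A's window before index m, as a plain list
def winList (wl : List String) (K m : Nat) : List String :=
  (wl.take m).drop (m - min m K)

theorem windowA (wl : List String) (ws : Int) (hws : 2 ≤ ws) (m : Nat) :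
    PySem.List.slice wl (some (max 0 ((m : Int) - ws))) (some (m : Int)) = winList wl ws.toNat m := by
  rw [PySem.List.slice_toNat wl (by omega) (by omega)]
  have h1 : (max 0 ((m : Int) - ws)).toNat = m - min m ws.toNat := by omega
  have h2 : ((m : Int)).toNat = m := by omega
  rw [h1, h2, winList, List.drop_take]

theorem length_winList (wl : List String) (K m : Nat) (hm : m ≤ wl.length) :
    (winList wl K m).length = min m K := by
  simp only [winList, List.length_drop, List.length_take]
  omega

theorem take_succ_getElem (wl : List String) (m : Nat) (hm : m < wl.length) :
    wl.take (m + 1) = wl.take m ++ [wl[m]] := by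
  rw [List.take_add_one, List.getElem?_eq_getElem hm]
  rfl

theorem winList_succ_lt (wl : List String) (K m : Nat) (h : m < K) (hm : m < wl.length) :
    winList wl K (m + 1) = winList wl K m ++ [wl[m]] := by
  have e1 : m + 1 - min (m + 1) K = 0 := by omega
  have e2 : m - min m K = 0 := by omega
  simp only [winList, e1, e2, List.drop_zero]
  exact take_succ_getElem wl m hm

theorem winList_take (wl : List String) (K m : Nat) (hK : K ≤ m) :
    winList wl K m = (wl.take m).drop (m - K) := by
  have : min m K = K := by omega
  simp only [winList, this]

theorem winList_cons (wl : List String) (K m : Nat) (hK : 0 < K) (h : K ≤ m) (hm : m ≤ wl.length) :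
    winList wl K m = wl[m - K]'(by omega) :: (wl.take m).drop (m + 1 - K) := by
  rw [winList_take wl K m h]
  have hlt : m - K < (wl.take m).length := by simp; omega
  rw [List.drop_eq_getElem_cons hlt]
  have he : m - K + 1 = m + 1 - K := by omega
  rw [he, List.getElem_take]

theorem winList_succ_ge (wl : List String) (K m : Nat) (hK : 0 < K) (h : K ≤ m) (hm : m < wl.length) :
    winList wl K (m + 1) = (wl.take m).drop (m + 1 - K) ++ [wl[m]] := by
  rw [winList_take wl K (m + 1) (by omega), take_succ_getElem wl m hm,
    List.drop_append_of_le_length (by simp; omega)]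

-- arithmetic of the window counter when the window is full (a word falls off the front)
theorem full_step (g : String → Int) (back cur w : String) (W0 : List String)
    (hg : ∀ x, g x = (((back :: W0).count x : Nat) : Int)) :
    (if w = back then (if back = cur then g cur + 1 else g back) - 1
     else (if w = cur then g cur + 1 else g w)) = (((W0 ++ [cur]).count w : Nat) : Int) := by
  simp only [hg, List.count_cons, List.count_append, List.count_nil, beq_iff_eq]
  split_ifs <;> subst_vars <;> simp_all

-- arithmetic of the window counter while the window is still growing
theorem grow_step (g : String → Int) (cur w : String) (W : List String)
    (hg : ∀ x, g x = ((W.count x : Nat) : Int)) :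
    (if w = cur then g cur + 1 else g w) = (((W ++ [cur]).count w : Nat) : Int) := by
  simp only [hg, List.count_append, List.count_cons, List.count_nil, beq_iff_eq]
  split_ifs <;> subst_vars <;> simp_all

-- the loop invariant: after the first m words, B's accumulated result equals A's
-- partial fold, and B's window counter holds exactly the multiset of A's window
theorem inv (wl : List String) (ws : Int) (hws : 2 ≤ ws) (m : Nat) (hm : m ≤ wl.length) :
    ((PySem.List.enumerate (wl.take m) 0).foldl (stepB wl ws)
        ((PySem.Dict.empty : PySem.Dict String Int), (PySem.Dict.empty : PySem.Dict String Int))).1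
      = (PySem.List.pyRange 0 (m : Int) 1).foldl (stepA wl ws) PySem.Dict.empty
    ∧ ∀ w, ((PySem.List.enumerate (wl.take m) 0).foldl (stepB wl ws)
        ((PySem.Dict.empty : PySem.Dict String Int), (PySem.Dict.empty : PySem.Dict String Int))).2.getD w 0
      = ((winList wl ws.toNat m).count w : Int) := by
  induction m with
  | zero =>
      constructor
      · simp [PySem.List.pyRange_one_eq_nil (by omega : (0 : Int) ≤ 0)]
      · intro w
        simp [winList, PySem.Dict.getD_empty]
  | succ m ih =>
      obtain ⟨ih1, ih2⟩ := ih (by omega)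
      have hmn : m < wl.length := by omega
      have hlen : (wl.take m).length = m := by simp; omega
      have eEnum : PySem.List.enumerate (wl.take (m + 1)) 0
          = PySem.List.enumerate (wl.take m) 0 ++ [((m : Int), wl[m])] := by
        rw [take_succ_getElem wl m hmn, PySem.List.enumerate_append]
        simp [PySem.List.enumerate, hlen]
      have eCast : ((m + 1 : Nat) : Int) = (m : Int) + 1 := by push_cast; ring
      have eRange : PySem.List.pyRange 0 ((m + 1 : Nat) : Int) 1
          = PySem.List.pyRange 0 (m : Int) 1 ++ [(m : Int)] := by
        rw [eCast]
        exact PySem.List.pyRange_one_succ_right (by omega)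
      set st := (PySem.List.enumerate (wl.take m) 0).foldl (stepB wl ws)
        ((PySem.Dict.empty : PySem.Dict String Int), (PySem.Dict.empty : PySem.Dict String Int)) with hst
      have hword : PySem.List.pyGetD wl (m : Int) "" = wl[m] := by
        rw [PySem.List.pyGetD_eq_getElem wl "" (by omega) (by omega)]
        simp
      have hwin := windowA wl ws hws m
      have hwlen : (winList wl ws.toNat m).length = min m ws.toNat :=
        length_winList wl ws.toNat m (by omega)
      have hcond : ((PySem.List.pyGetD wl (m : Int) "") ∈
            PySem.List.slice wl (some (max 0 ((m : Int) - ws))) (some (m : Int)) ∧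
            1 < (PySem.List.slice wl (some (max 0 ((m : Int) - ws))) (some (m : Int))).length)
          ↔ (1 < (m : Int) ∧ 0 < st.2.getD wl[m] 0) := by
        rw [hword, hwin, ih2 wl[m]]
        constructor
        · rintro ⟨hmem, hlen1⟩
          refine ⟨by rw [hwlen] at hlen1; omega, ?_⟩
          have := List.count_pos_iff.mpr hmem
          omega
        · rintro ⟨h1, h2⟩
          have hc : 0 < (winList wl ws.toNat m).count wl[m] := by omega
          exact ⟨List.count_pos_iff.mp hc, by rw [hwlen]; omega⟩
      constructor
      · -- result components agree
        rw [eEnum, List.foldl_append, ← hst, eRange, List.foldl_append, ← ih1]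
        simp only [List.foldl_cons, List.foldl_nil]
        by_cases hc : 1 < (m : Int) ∧ 0 < st.2.getD wl[m] 0
        · show (stepB wl ws st ((m : Int), wl[m])).1 = stepA wl ws st.1 (m : Int)
          simp only [stepB, stepA]
          rw [if_pos hc, if_pos (hcond.mpr hc), hword]
        · show (stepB wl ws st ((m : Int), wl[m])).1 = stepA wl ws st.1 (m : Int)
          simp only [stepB, stepA]
          rw [if_neg hc, if_neg (fun h => hc (hcond.mp h))]
      · -- window-counter invariant advances
        intro w
        rw [eEnum, List.foldl_append]
        simp only [List.foldl_cons, List.foldl_nil, ← hst]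
        show (stepB wl ws st ((m : Int), wl[m])).2.getD w 0 = _
        simp only [stepB]
        by_cases hj : 0 ≤ (m : Int) - ws
        · -- the window is full: a word falls off the front
          have hK : ws.toNat ≤ m := by omega
          have hKpos : 0 < ws.toNat := by omega
          have hback : PySem.List.pyGetD wl ((m : Int) - ws) "" = wl[m - ws.toNat]'(by omega) := by
            rw [PySem.List.pyGetD_eq_getElem wl "" (by omega) (by omega)]
            congr 1
            omega
          rw [if_pos hj, hback]
          simp only [PySem.Dict.getD_modify]
          rw [winList_succ_ge wl ws.toNat m hKpos hK hmn]
          have hcons := winList_cons wl ws.toNat m hKpos hK (by omega)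
          have hg : ∀ x, st.2.getD x 0
              = (((wl[m - ws.toNat]'(by omega) :: (wl.take m).drop (m + 1 - ws.toNat)).count x : Nat) : Int) := by
            intro x
            rw [ih2 x, ← hcons]
          exact full_step (fun x => st.2.getD x 0) (wl[m - ws.toNat]'(by omega)) wl[m] w
            ((wl.take m).drop (m + 1 - ws.toNat)) hg
        · -- the window is still growing
          have hK : m < ws.toNat := by omega
          rw [if_neg hj, PySem.Dict.getD_modify,
            winList_succ_lt wl ws.toNat m hK hmn]
          exact grow_step (fun x => st.2.getD x 0) wl[m] w (winList wl ws.toNat m) ih2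

-- ===== VERDICT (by name: the statement is the Claim_ definition above) =====
theorem count_repetition_spec : Claim_equal_count_repetition := by
  intro wl ws _
  unfold Spec_count_repetition count_repetition count_repetition_alt
  by_cases hws : ws < 2
  · rw [if_pos hws]
    have hnil : (PySem.List.pyRange 0 (wl.length : Int) 1).foldl (stepA wl ws)
        (PySem.Dict.empty : PySem.Dict String Int) = PySem.Dict.empty := by
      rw [PySem.List.foldl_congr_mem _ _ (fun acc _ => acc) _ ?_, PySem.List.foldl_ignore]
      intro acc i hi
      rw [PySem.List.mem_pyRange_one] at hi
      simp only [stepA]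
      rw [if_neg]
      rintro ⟨-, hlen⟩
      rw [PySem.List.slice_toNat wl (by omega) (by omega)] at hlen
      simp only [List.length_take, List.length_drop] at hlen
      omega
    rw [hnil]
  · rw [if_neg hws]
    have h := (inv wl ws (by omega) wl.length (le_refl _)).1
    rw [List.take_length] at h
    rw [h]
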